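-- pv_equiv track=rewrite | github.com/bonnemai/trainings | janitor.py | efficientJanitor
-- ===== SOURCE A (Python) =====
-- def efficientJanitor(weight):
--     # Write your code here
--     if len(weight)<1:
--         return 0
--     weight.sort()
--     left=0
--     right=len(weight)-1
--     results=0
--     while left<=right:
--         if left==right:
--             results+=1
--             break
--         if weight[left]+weight[right]<=3:
--             left+=1
--             right-=1
--             results+=1
--         else:
--             right-=1
--             results+=1
--     return results
-- ===== SOURCE B (Python) =====
-- def efficientJanitor(weight):
--     # Sort, then binary-search the largest k such that the 2k lightest bags
--     # pair up as (i, 2k-1-i) within the limit; trips = n - k.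
--     # (Sorts `weight` in place, like the original.)
--     if len(weight) < 1:
--         return 0
--     weight.sort()
--     n = len(weight)
--
--     def fits(k):
--         return all(weight[i] + weight[2 * k - 1 - i] <= 3 for i in range(k))
--
--     lo, hi = 0, n // 2
--     while lo < hi:
--         mid = (lo + hi + 1) // 2
--         if fits(mid):
--             lo = mid
--         else:
--             hi = mid - 1
--     return n - lo
-- ===== Notes on version B (the rewrite author's own statement) =====
-- stated objective: alternative
-- what changed: B replaces A's two-pointer greedy sweep by a binary search over the answer: it finds the largest k such that the 2k lightest bags pair up as (i, 2k-1-i) within the limit and returns n-k; the proof shows this max-k characterisation equals the greedy pair count.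
import Mathlib
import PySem

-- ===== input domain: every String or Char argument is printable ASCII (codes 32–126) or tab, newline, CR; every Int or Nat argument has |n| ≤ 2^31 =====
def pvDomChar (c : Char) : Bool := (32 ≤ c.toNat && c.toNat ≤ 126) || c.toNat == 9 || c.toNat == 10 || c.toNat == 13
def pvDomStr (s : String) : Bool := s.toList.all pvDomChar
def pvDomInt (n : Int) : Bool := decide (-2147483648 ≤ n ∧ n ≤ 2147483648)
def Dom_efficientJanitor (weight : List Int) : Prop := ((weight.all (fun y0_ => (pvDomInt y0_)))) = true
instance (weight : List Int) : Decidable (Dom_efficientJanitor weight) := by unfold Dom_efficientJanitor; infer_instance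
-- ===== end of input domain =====

-- B replaces A's two-pointer greedy sweep by a binary search for the largest k such
-- that the 2k lightest bags pair up within the limit (trips = n - k); both sort the
-- argument in place on the Python side, and the equivalence is about the return value.

-- ===== PORT A =====
-- A's while loop: state (left, right, results). The Nat fuel only makes the loop
-- total (length + 1 always suffices; the loop runs at most length iterations);
-- indices are always in range, so the (never reached) out-of-range default of
-- pyGetD is 0.
def ejLoopA (w : List Int) (fuel : Nat) (left right results : Int) : Int :=
  match fuel with
  | 0 => results
  | fuel + 1 =>
    if left ≤ right then
      if left = right then results + 1
      else if PySem.List.pyGetD w left 0 + PySem.List.pyGetD w right 0 ≤ 3 then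
        ejLoopA w fuel (left + 1) (right - 1) (results + 1)
      else
        ejLoopA w fuel left (right - 1) (results + 1)
    else results

def efficientJanitor (weight : List Int) : Int :=
  if weight.length < 1 then 0
  else
    let w := PySem.List.sorted weight (fun x => x)
    ejLoopA w (w.length + 1) 0 ((w.length : Int) - 1) 0

-- ===== PORT B =====
-- B's helper fits(k): the 2k lightest bags pair up as (i, 2k-1-i) within the limit.
-- Indices are in range whenever 2*k ≤ len, which the binary search maintains.
def ejFits (w : List Int) (k : Nat) : Bool :=
  (List.range k).all (fun i =>
    decide (PySem.List.pyGetD w (i : Int) 0 + PySem.List.pyGetD w (2 * (k : Int) - 1 - i) 0 ≤ 3))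

-- B's while loop: binary search for the largest fitting k in [lo, hi].
def ejSearch (w : List Int) (lo hi : Nat) : Nat :=
  if lo < hi then
    let mid := (lo + hi + 1) / 2
    if ejFits w mid then ejSearch w mid hi else ejSearch w lo (mid - 1)
  else lo
termination_by hi - lo
decreasing_by all_goals omega

def efficientJanitor_alt (weight : List Int) : Int :=
  if weight.length < 1 then 0
  else
    let w := PySem.List.sorted weight (fun x => x)
    (w.length : Int) - (ejSearch w 0 (w.length / 2) : Int)

-- ===== PRECONDITION & SPEC =====
def Spec_efficientJanitor (weight : List Int) (out : Int) : Prop := out = efficientJanitor_alt weight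
instance (weight : List Int) (out : Int) : Decidable (Spec_efficientJanitor weight out) := by unfold Spec_efficientJanitor; infer_instance

-- ===== CLAIM (what is proved, stated in full; the proofs are below) =====
def Claim_equal_efficientJanitor : Prop := ∀ (weight : List Int), Dom_efficientJanitor weight → Spec_efficientJanitor weight (efficientJanitor weight)

-- ===== LEMMAS AND PROOFS =====

-- Greedy pair count of A's sweep on the window [l, r] (proof-side helper).
def ejGp (w : List Int) (l r : Int) : Nat :=
  if h : l < r then
    if PySem.List.pyGetD w l 0 + PySem.List.pyGetD w r 0 ≤ 3 then
      ejGp w (l + 1) (r - 1) + 1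
    else
      ejGp w l (r - 1)
  else 0
termination_by (r + 1 - l).toNat
decreasing_by all_goals omega

-- Feasibility of k pairs starting at offset l (Int indices, no Nat subtraction).
def ejFeas (w : List Int) (l : Int) (k : Nat) : Prop :=
  ∀ i : Nat, i < k →
    PySem.List.pyGetD w (l + i) 0 + PySem.List.pyGetD w (l + 2 * k - 1 - i) 0 ≤ 3

theorem ejGetMono (w : List Int) (hs : w.Pairwise (· ≤ ·)) (a b : Int)
    (h0 : 0 ≤ a) (hab : a ≤ b) (hb : b < (w.length : Int)) :
    PySem.List.pyGetD w a 0 ≤ PySem.List.pyGetD w b 0 := by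
  rw [PySem.List.pyGetD_eq_getElem w (i := a) 0 h0 (by omega),
      PySem.List.pyGetD_eq_getElem w (i := b) 0 (by omega) hb]
  rcases Nat.lt_or_ge a.toNat b.toNat with h | h
  · exact List.pairwise_iff_getElem.mp hs a.toNat b.toNat (by omega) (by omega) h
  · have : a.toNat = b.toNat := by omega
    simp [this]

-- A's loop returns res + (window size) - (greedy pairs of the window).
theorem ejLoopA_eq (w : List Int) (fuel : Nat) :
    ∀ (l r res : Int), l ≤ r + 1 → (r + 1 - l).toNat < fuel →
      ejLoopA w fuel l r res = res + (r + 1 - l) - (ejGp w l r : Int) := by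
  induction fuel with
  | zero => intro l r res _ hf; omega
  | succ f ih =>
    intro l r res hlr hf
    rw [ejLoopA, ejGp]
    by_cases hle : l ≤ r
    · simp only [if_pos hle]
      by_cases heq : l = r
      · have : ¬ l < r := by omega
        simp only [if_pos heq, dif_neg this]
        omega
      · have hlt : l < r := by omega
        simp only [if_neg heq, dif_pos hlt]
        split
        · rw [ih (l + 1) (r - 1) (res + 1) (by omega) (by omega)]
          push_cast; ring
        · rw [ih l (r - 1) (res + 1) (by omega) (by omega)]
          ring
    · have : ¬ l < r := by omega
      simp only [if_neg hle, dif_neg this]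
      omega

-- The greedy pair count is feasible and fits inside the window.
theorem ejGp_feas (w : List Int) (hs : w.Pairwise (· ≤ ·)) :
    ∀ n : Nat, ∀ l r : Int, (r + 1 - l).toNat ≤ n → 0 ≤ l → r < (w.length : Int) →
      l ≤ r + 1 → ejFeas w l (ejGp w l r) ∧ l + 2 * (ejGp w l r : Int) ≤ r + 1 := by
  intro n
  induction n with
  | zero =>
    intro l r _ _ _ hlr
    have : ¬ l < r := by omega
    rw [ejGp]; simp only [dif_neg this]
    exact ⟨fun i hi => by omega, by omega⟩
  | succ n ih =>
    intro l r hn h0 hr hlr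
    rw [ejGp]
    by_cases hlt : l < r
    · simp only [dif_pos hlt]
      split
      · rename_i hpair
        obtain ⟨hfe, hb⟩ := ih (l + 1) (r - 1) (by omega) (by omega) (by omega) (by omega)
        set g := ejGp w (l + 1) (r - 1) with hg
        refine ⟨fun i hi => ?_, by push_cast; omega⟩
        rcases Nat.eq_zero_or_pos i with rfl | hip
        · have hidx : l + 2 * ((g + 1 : Nat) : Int) - 1 - (0 : Nat) = l + 2 * g + 1 := by
            push_cast; ring
          rw [hidx]
          have h1 : PySem.List.pyGetD w (l + 2 * g + 1) 0 ≤ PySem.List.pyGetD w r 0 :=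
            ejGetMono w hs _ _ (by omega) (by omega) hr
          have h2 : PySem.List.pyGetD w (l + (0 : Nat)) 0 = PySem.List.pyGetD w l 0 := by
            norm_num
          rw [h2]; omega
        · have hic : i - 1 < g := by omega
          have := hfe (i - 1) hic
          have e1 : l + 1 + ((i - 1 : Nat) : Int) = l + (i : Nat) := by
            omega
          have e2 : l + 1 + 2 * (g : Int) - 1 - ((i - 1 : Nat) : Int)
              = l + 2 * ((g + 1 : Nat) : Int) - 1 - (i : Nat) := by
            push_cast; omega
          rw [e1, e2] at this
          exact this
      · obtain ⟨hfe, hb⟩ := ih l (r - 1) (by omega) (by omega) (by omega) (by omega)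
        exact ⟨hfe, by omega⟩
    · simp only [dif_neg hlt]
      exact ⟨fun i hi => by omega, by omega⟩

-- Any feasible k is at most the greedy pair count (greedy maximality).
theorem ejGp_max (w : List Int) :
    ∀ n : Nat, ∀ l r : Int, ∀ k : Nat, (r + 1 - l).toNat ≤ n → 0 ≤ l →
      r < (w.length : Int) → l + 2 * (k : Int) ≤ r + 1 → ejFeas w l k →
      k ≤ ejGp w l r := by
  intro n
  induction n with
  | zero =>
    intro l r k _ _ _ hb _
    omega
  | succ n ih =>
    intro l r k hn h0 hr hb hfe
    rw [ejGp]
    by_cases hlt : l < r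
    · simp only [dif_pos hlt]
      split
      · rename_i hpair
        rcases Nat.eq_zero_or_pos k with rfl | hk
        · omega
        · have hfe' : ejFeas w (l + 1) (k - 1) := by
            intro j hj
            have := hfe (j + 1) (by omega)
            have e1 : l + ((j + 1 : Nat) : Int) = l + 1 + (j : Nat) := by push_cast; ring
            have e2 : l + 2 * (k : Int) - 1 - ((j + 1 : Nat) : Int)
                = l + 1 + 2 * ((k - 1 : Nat) : Int) - 1 - (j : Nat) := by
              push_cast; omega
            rw [e1, e2] at this
            exact this
          have := ih (l + 1) (r - 1) (k - 1) (by omega) (by omega) (by omega)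
            (by omega) hfe'
          omega
      · rename_i hpair
        rcases Nat.eq_zero_or_pos k with rfl | hk
        · omega
        · have hb' : l + 2 * (k : Int) ≤ r := by
            by_contra hcon
            have heq : l + 2 * (k : Int) - 1 = r := by omega
            have := hfe 0 hk
            have e1 : l + ((0 : Nat) : Int) = l := by norm_num
            have e2 : l + 2 * (k : Int) - 1 - ((0 : Nat) : Int) = r := by
              push_cast; omega
            rw [e1, e2] at this
            omega
          exact ih l (r - 1) k (by omega) h0 (by omega) (by omega) hfe
    · simp only [dif_neg hlt]
      omega

-- ejFits is ejFeas at offset 0.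
theorem ejFits_iff (w : List Int) (k : Nat) :
    ejFits w k = true ↔ ejFeas w 0 k := by
  unfold ejFits ejFeas
  simp only [List.all_eq_true, List.mem_range, decide_eq_true_eq]
  constructor
  · intro h i hi
    have := h i hi
    have e : (0 : Int) + 2 * (k : Nat) - 1 - (i : Nat) = 2 * (k : Int) - 1 - i := by
      ring
    rw [zero_add, e]
    exact this
  · intro h i hi
    have := h i hi
    have e : (0 : Int) + 2 * (k : Nat) - 1 - (i : Nat) = 2 * (k : Int) - 1 - i := by
      ring
    rw [zero_add, e] at this
    exact this

-- Feasibility is downward monotone in k on a sorted list.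
theorem ejFits_step (w : List Int) (hs : w.Pairwise (· ≤ ·)) (k : Nat)
    (hk : 2 * (k + 1) ≤ w.length) (h : ejFits w (k + 1) = true) :
    ejFits w k = true := by
  rw [ejFits_iff] at h ⊢
  intro i hi
  have h1 := h i (by omega)
  have hmono : PySem.List.pyGetD w (0 + 2 * (k : Int) - 1 - i) 0
      ≤ PySem.List.pyGetD w (0 + 2 * ((k + 1 : Nat) : Int) - 1 - i) 0 := by
    apply ejGetMono w hs _ _ (by omega) (by push_cast; omega)
    push_cast; omega
  push_cast at h1 hmono ⊢
  omega

theorem ejFits_mono (w : List Int) (hs : w.Pairwise (· ≤ ·)) :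
    ∀ k j : Nat, j ≤ k → 2 * k ≤ w.length → ejFits w k = true → ejFits w j = true := by
  intro k
  induction k with
  | zero =>
    intro j hj _ h
    have : j = 0 := by omega
    subst this; exact h
  | succ k ih =>
    intro j hj hk h
    rcases Nat.eq_or_lt_of_le hj with rfl | hlt
    · exact h
    · exact ih j (by omega) (by omega) (ejFits_step w hs k hk h)

-- Binary-search characterisation: ejSearch returns the largest fitting k in [lo, hi].
theorem ejSearch_spec (w : List Int) (hs : w.Pairwise (· ≤ ·)) :
    ∀ lo hi : Nat, lo ≤ hi → 2 * hi ≤ w.length → ejFits w lo = true →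
      lo ≤ ejSearch w lo hi ∧ ejSearch w lo hi ≤ hi ∧
      ejFits w (ejSearch w lo hi) = true ∧
      ∀ k : Nat, ejSearch w lo hi < k → k ≤ hi → ejFits w k = false := by
  intro lo hi
  induction lo, hi using ejSearch.induct w with
  | case1 lo hi hlt mid hfit ih =>
    intro _ hhi hlo
    rw [ejSearch]
    simp only [if_pos hlt]
    rw [show (lo + hi + 1) / 2 = mid from rfl]
    simp only [if_pos hfit]
    obtain ⟨p1, p2, p3, p4⟩ := ih (by omega) hhi hfit
    exact ⟨by omega, p2, p3, p4⟩
  | case2 lo hi hlt mid hfit ih =>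
    intro hle hhi hlo
    rw [ejSearch]
    simp only [if_pos hlt]
    rw [show (lo + hi + 1) / 2 = mid from rfl]
    simp only [if_neg hfit]
    obtain ⟨p1, p2, p3, p4⟩ := ih (by omega) (by omega) hlo
    refine ⟨p1, by omega, p3, fun k hk1 hk2 => ?_⟩
    by_cases hkm : k ≤ mid - 1
    · exact p4 k hk1 hkm
    · by_cases ht : ejFits w k = true
      · exfalso
        have : ejFits w mid = true :=
          ejFits_mono w hs k mid (by omega) (by omega) ht
        simp [this] at hfit
      · simpa using ht
  | case3 lo hi hlt =>
    intro hle _ hlo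
    rw [ejSearch]
    simp only [if_neg hlt]
    exact ⟨le_refl lo, hle, hlo, fun k hk1 hk2 => by omega⟩

theorem ejFits_zero (w : List Int) : ejFits w 0 = true := by
  unfold ejFits; simp

-- ===== VERDICT (by name: the statement is the Claim_ definition above) =====
theorem efficientJanitor_spec : Claim_equal_efficientJanitor := by
  intro weight _
  unfold Spec_efficientJanitor efficientJanitor efficientJanitor_alt
  by_cases h1 : weight.length < 1
  · simp [h1]
  · simp only [if_neg h1]
    set w := PySem.List.sorted weight (fun x => x) with hw
    have hlen : w.length = weight.length := PySem.List.length_sorted ..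
    have hn : 1 ≤ w.length := by omega
    have hs : w.Pairwise (· ≤ ·) := PySem.List.sorted_pairwise weight (fun x => x)
    have hA := ejLoopA_eq w (w.length + 1) 0 ((w.length : Int) - 1) 0
      (by omega) (by omega)
    rw [hA]
    have hgp := ejGp_feas w hs ((((w.length : Int) - 1) + 1 - 0).toNat) 0 ((w.length : Int) - 1)
      (by omega) (by omega) (by omega) (by omega)
    obtain ⟨hfe, hb⟩ := hgp
    set g := ejGp w 0 ((w.length : Int) - 1) with hg
    have hghalf : g ≤ w.length / 2 := by omega
    have hsearch := ejSearch_spec w hs 0 (w.length / 2) (by omega) (by omega)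
      (ejFits_zero w)
    obtain ⟨q1, q2, q3, q4⟩ := hsearch
    set res := ejSearch w 0 (w.length / 2) with hres
    have hge : g ≤ res := by
      by_contra hcon
      have := q4 g (by omega) hghalf
      have : ejFits w g = true := (ejFits_iff w g).mpr hfe
      simp_all
    have hle : res ≤ g := by
      apply ejGp_max w ((((w.length : Int) - 1) + 1 - 0).toNat) 0 ((w.length : Int) - 1) res
        (by omega) (by omega) (by omega) (by omega)
      exact (ejFits_iff w res).mp q3
    have : g = res := by omega
    omega
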